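-- pv_equiv track=rewrite | github.com/filemon11/discoparset-supertag | src/CCG_helper.py | get_type_sketch
-- ===== SOURCE A (Python) =====
-- from typing import DefaultDict, List, Tuple, Optional, Dict, Set, Any, Hashable
--
-- def get_type_sketch(supertag : str) -> str:
--     '''Converts supertag into sketch with
--     identical elements replaced by the
--     same symbol.
--
--     Multi-character symbols are treated
--     the same as one-character symbols.
--
--     example:
--     "(A/B)\A" -> "(0/1)\0"
--
--     :param elements: supertag
--     :type supertag: str
--
--     :returns: type sketch
--     :rtype: str
--     '''
--
--     def get_symbol(s : str) -> str:
--         '''Identify CCG constituent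
--         symbol that may be followed
--         by arguments and parentheses.
--
--         :param s: supertag fragment
--         :type s: str
--
--         :returns: constituent symbol
--         :rtype: str
--         '''
--         i : int = 0
--         s += ")"    # concatenate in order for
--                     # index to shift past the last
--                     # element when the string contains
--                     # just a constituent
--
--         # iterate through the given string
--         # until you find slash or a parenthesis
--
--         for i, c in enumerate(s):
--             if c in ("\\", "/", "(", ")"):
--                 break
--
--         return s[:i]
--
--     class CountingDict(dict):
--         '''Default dictionary that
--         sets the value for new unknow
--         elements as the current
--         dictionary length
--         '''
--
--         def __init__(self, *args):
--             '''Constructor'''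
--             dict.__init__(self, *args)
--
--         def __missing__(self, key : Hashable) -> int:
--             '''Called when retrieving an element not
--             in the dictionary. Adds the element,
--             assigns it the current length of the
--             dictionary and returns the length.
--
--             :param key:
--             :type key: Hashable
--
--             :returns: length of self
--             :rtype: int'''
--
--             value : int = len(self)
--             self[key]   = value
--
--             return value
--
--     symbol_dict : CountingDict = CountingDict()
--
--     sketch      : str = ""
--     in_symbol   : bool = False
--
--     for i, c in enumerate(supertag):
--
--         if c not in ("\\", "/", "(", ")"):
--             if in_symbol:
--                 continue
--
--             sketch += str(symbol_dict[get_symbol(supertag[i:])])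
--             in_symbol = True
--
--         else:
--             sketch += c
--             in_symbol = False
--
--     return sketch
-- ===== SOURCE B (Python) =====
-- import re
--
-- def get_type_sketch(supertag: str) -> str:
--     '''Tokenize the supertag into delimiters and maximal symbols,
--     then number symbols by first occurrence in one mapping pass.'''
--     numbering: dict = {}
--     out = []
--     for tok in re.findall(r'[\\/()]|[^\\/()]+', supertag):
--         if tok in ("\\", "/", "(", ")"):
--             out.append(tok)
--         else:
--             out.append(str(numbering.setdefault(tok, len(numbering))))
--     return "".join(out)
-- ===== Notes on version B (the rewrite author's own statement) =====
-- stated objective: simpler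
-- what changed: B tokenizes the whole supertag first (regex: single delimiters vs maximal non-delimiter runs) and then numbers symbol tokens in one mapping pass with dict.setdefault, eliminating A's character-level scan with the in_symbol flag and the per-symbol get_symbol lookahead sub-scan over a slice.
import Mathlib
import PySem

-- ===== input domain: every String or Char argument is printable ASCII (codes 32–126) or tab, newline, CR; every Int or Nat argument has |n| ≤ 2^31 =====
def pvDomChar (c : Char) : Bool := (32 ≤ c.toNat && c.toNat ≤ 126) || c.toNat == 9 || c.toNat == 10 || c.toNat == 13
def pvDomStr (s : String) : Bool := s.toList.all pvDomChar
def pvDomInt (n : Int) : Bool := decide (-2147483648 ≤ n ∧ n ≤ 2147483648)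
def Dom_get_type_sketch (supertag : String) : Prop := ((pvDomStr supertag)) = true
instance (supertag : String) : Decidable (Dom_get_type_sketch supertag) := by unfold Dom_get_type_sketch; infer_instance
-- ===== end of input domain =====

-- B replaces A's character-level scan (in_symbol flag + get_symbol lookahead slice) by
-- whole-string tokenization followed by one mapping pass over the tokens (objective: simpler).

-- ===== PORT A =====

def pvIsDelim (c : Char) : Bool := c = '\\' || c = '/' || c = '(' || c = ')'

-- the enumerate/break loop of get_symbol: index of the first delimiter
-- (a ')' is appended by the caller, so the break always fires before the list ends)
def pvFindBrk : List Char → Nat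
  | [] => 0
  | c :: rest => if pvIsDelim c then 0 else pvFindBrk rest + 1

-- get_symbol: append ")", scan to first delimiter, return the prefix s[:i]
def pvGetSymbol (s : List Char) : List Char :=
  let s' := s ++ [')']
  s'.take (pvFindBrk s')

-- the main for loop of A over the remaining characters (supertag[i:] is exactly
-- the remaining suffix, so get_symbol is applied to it directly);
-- CountingDict lookup = if present return value, else bind to len(dict)
def pvLoopA : List Char → PySem.Dict String Int → List Char → Bool → List Char
  | [], _, sketch, _ => sketch
  | c :: rest, d, sketch, insym =>
    if ¬ pvIsDelim c then
      if insym then pvLoopA rest d sketch insym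
      else
        let sym := String.ofList (pvGetSymbol (c :: rest))
        match d.get? sym with
        | some v => pvLoopA rest d (sketch ++ (PySem.Int.toStr v).toList) true
        | none   => pvLoopA rest (d.insert sym (d.size : Int))
                      (sketch ++ (PySem.Int.toStr (d.size : Int)).toList) true
    else
      pvLoopA rest d (sketch ++ [c]) false

def get_type_sketch (supertag : String) : String :=
  String.ofList (pvLoopA supertag.toList PySem.Dict.empty [] false)

-- ===== PORT B =====

-- re.findall(r'[\\/()]|[^\\/()]+', supertag): single delimiters, maximal non-delimiter runs
def pvTokenize : List Char → List (List Char)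
  | [] => []
  | c :: rest =>
    if pvIsDelim c then [c] :: pvTokenize rest
    else (c :: rest.takeWhile (fun x => ¬ pvIsDelim x))
           :: pvTokenize (rest.dropWhile (fun x => ¬ pvIsDelim x))
termination_by l => l.length
decreasing_by
  · simp
  · simpa using Nat.lt_succ_of_le (List.length_dropWhile_le _ _)

-- the mapping pass: delimiter tokens pass through, symbol tokens are numbered
-- by first occurrence (dict.setdefault(tok, len(d)))
def pvLoopB : List (List Char) → PySem.Dict String Int → List Char → List Char
  | [], _, out => out
  | t :: ts, d, out =>
    if pvIsDelim (t.headD ' ') ∧ t.length = 1 then pvLoopB ts d (out ++ t)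
    else
      match d.get? (String.ofList t) with
      | some v => pvLoopB ts d (out ++ (PySem.Int.toStr v).toList)
      | none   => pvLoopB ts (d.insert (String.ofList t) (d.size : Int))
                    (out ++ (PySem.Int.toStr (d.size : Int)).toList)

def get_type_sketch_alt (supertag : String) : String :=
  String.ofList (pvLoopB (pvTokenize supertag.toList) PySem.Dict.empty [])

-- ===== PRECONDITION & SPEC =====
def Spec_get_type_sketch (supertag : String) (out : String) : Prop := out = get_type_sketch_alt supertag
instance (supertag : String) (out : String) : Decidable (Spec_get_type_sketch supertag out) := by unfold Spec_get_type_sketch; infer_instance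

-- ===== CLAIM (what is proved, stated in full; the proofs are below) =====
def Claim_equal_get_type_sketch : Prop := ∀ (supertag : String), Dom_get_type_sketch supertag → Spec_get_type_sketch supertag (get_type_sketch supertag)

-- ===== LEMMAS AND PROOFS =====

theorem pvTokenize_nil : pvTokenize [] = [] := by rw [pvTokenize.eq_def]

theorem pvTokenize_cons (c : Char) (rest : List Char) :
    pvTokenize (c :: rest)
      = if pvIsDelim c then [c] :: pvTokenize rest
        else (c :: rest.takeWhile (fun x => ¬ pvIsDelim x))
               :: pvTokenize (rest.dropWhile (fun x => ¬ pvIsDelim x)) := by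
  rw [pvTokenize.eq_def]

-- get_symbol returns the maximal non-delimiter prefix
theorem pvGetSymbol_eq (l : List Char) :
    pvGetSymbol l = l.takeWhile (fun x => ¬ pvIsDelim x) := by
  induction l with
  | nil => simp [pvGetSymbol, pvFindBrk, pvIsDelim]
  | cons c rest ih =>
    by_cases h : pvIsDelim c = true
    · simp [pvGetSymbol, pvFindBrk, h, List.takeWhile]
    · simp only [pvGetSymbol, List.cons_append, pvFindBrk, h, if_neg, Bool.false_eq_true,
        ite_false, List.take_succ_cons, List.takeWhile_cons, h, decide_not]
      simp only [pvGetSymbol] at ih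
      simp [h, ih]

-- skipping characters while in_symbol is dropping the rest of the token
theorem pvLoopA_mode (n : Nat) :
    ∀ (r : List Char), r.length ≤ n → ∀ (b : Bool) (d : PySem.Dict String Int) (sk : List Char),
    pvLoopA r d sk b
      = pvLoopB (pvTokenize (if b then r.dropWhile (fun x => ¬ pvIsDelim x) else r)) d sk := by
  induction n with
  | zero =>
    intro r hr b d sk
    interval_cases hlen : r.length
    · rw [List.length_eq_zero_iff] at hlen; subst hlen
      cases b <;> simp [pvLoopA, pvTokenize_nil, pvLoopB]
  | succ n ih =>
    intro r hr b d sk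
    cases r with
    | nil => cases b <;> simp [pvLoopA, pvTokenize_nil, pvLoopB]
    | cons c rest =>
      have hrest : rest.length ≤ n := by simpa using hr
      by_cases hc : pvIsDelim c = true
      · -- delimiter: both modes emit c and reset
        have htok : pvTokenize (c :: rest) = [c] :: pvTokenize rest := by
          rw [pvTokenize_cons]; simp [hc]
        have hdrop : (c :: rest).dropWhile (fun x => ¬ pvIsDelim x) = c :: rest := by
          simp [List.dropWhile_cons, hc]
        have hB : pvLoopB (pvTokenize (c :: rest)) d sk
            = pvLoopB (pvTokenize rest) d (sk ++ [c]) := by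
          rw [htok, pvLoopB]; simp [hc]
        cases b <;>
          simp only [pvLoopA, hc, not_true, Bool.false_eq_true, if_false, ite_true, hdrop, hB] <;>
          exact ih rest hrest false d (sk ++ [c])
      · cases b with
        | true =>
          -- in_symbol: skip c
          have : (c :: rest).dropWhile (fun x => ¬ pvIsDelim x)
              = rest.dropWhile (fun x => ¬ pvIsDelim x) := by
            simp [List.dropWhile_cons, hc]
          simp only [pvLoopA, hc, not_false_iff, if_true, ite_true, this]
          exact ih rest hrest true d sk
        | false =>
          -- start of a symbol token
          have htok : pvTokenize (c :: rest)
              = (c :: rest.takeWhile (fun x => ¬ pvIsDelim x))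
                :: pvTokenize (rest.dropWhile (fun x => ¬ pvIsDelim x)) := by
            rw [pvTokenize_cons]; simp [hc]
          have hsym : pvGetSymbol (c :: rest) = c :: rest.takeWhile (fun x => ¬ pvIsDelim x) := by
            rw [pvGetSymbol_eq]; simp [List.takeWhile_cons, hc]
          have hnotdel : ¬ (pvIsDelim ((c :: rest.takeWhile (fun x => ¬ pvIsDelim x)).headD ' ')
              ∧ (c :: rest.takeWhile (fun x => ¬ pvIsDelim x)).length = 1) := by
            intro h; exact absurd h.1 (by simpa using hc)
          simp only [pvLoopA, hc, not_false_iff, if_true, Bool.false_eq_true, ite_false, hsym,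
            htok, pvLoopB, if_neg hnotdel]
          cases hg : (d.get? (String.ofList (c :: rest.takeWhile (fun x => ¬ pvIsDelim x)))) with
          | some v =>
            simpa using ih rest hrest true d (sk ++ (PySem.Int.toStr v).toList)
          | none =>
            simpa using ih rest hrest true
              (d.insert (String.ofList (c :: rest.takeWhile (fun x => ¬ pvIsDelim x))) (d.size : Int))
              (sk ++ (PySem.Int.toStr (d.size : Int)).toList)

-- ===== VERDICT (by name: the statement is the Claim_ definition above) =====
theorem get_type_sketch_spec : Claim_equal_get_type_sketch := by
  intro supertag _
  unfold Spec_get_type_sketch get_type_sketch get_type_sketch_alt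
  rw [pvLoopA_mode supertag.toList.length supertag.toList le_rfl false]
  simp
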